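-- pv_equiv track=rewrite | github.com/nakaeuna/comparaisonDAlgorithme | saefinal.py | evaluer_clause
-- ===== SOURCE A (Python) =====
-- def get(v:int, l:list):
--     assert(v>0)
--     return l[v-1]
--
-- def evaluer_clause(clause, list_var):
--     '''
--     Arguments : une liste d'entiers non nuls traduisant une clause, une liste de booléens
--     informant de valeurs logiques connues (ou None dans le cas contraire) pour un ensemble
--     de variables
--     Renvoie : None ou booléen
--     '''
--     result = False
--     unknown = False
--
--     if len(clause)<1 :
--         return result
--
--     for i in clause:
--         var = get(abs(i), list_var) # sélection la variable correspondant à la clause (absolue)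
--         if var == None :            # si var inconnue (None) -> pas calculable -> pass
--             unknown = True          # True si présance d'une var inconnue
--         else :
--             if i<0 :
--                 var = not(var) # si clause negative -> inverse la valeur
--             result = result or var  # calcul de la clause
--         if result :
--             return result   # si un résultat True alors clause True
--
--     if not(result) and unknown :  # si résultat False et présence d'une var inconnue donc potentiellement True alors result = None
--         result = None
--         return result
--
--     return result
-- ===== SOURCE B (Python) =====
-- def get(v:int, l:list):
--     assert(v>0)
--     return l[v-1]
--
-- def evaluer_clause(clause, list_var):
--     # Phase 1: resolve every literal to its three-valued result.
--     vals = []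
--     for i in clause:
--         v = get(abs(i), list_var)
--         if v is None:
--             vals.append(None)
--         else:
--             vals.append(not v if i < 0 else v)
--     # Phase 2: decide by membership on the whole list.
--     if True in vals:
--         return True
--     if None in vals:
--         return None
--     return False
-- ===== Notes on version B (the rewrite author's own statement) =====
-- stated objective: simpler
-- what changed: Replaces A's single stateful short-circuiting loop (result/unknown flags with three return points) by two phases: resolve every literal to a three-valued result, then decide by two membership tests; the empty-clause special case disappears.
-- outside the precondition, e.g. on evaluer_clause([1, 5], [True]): A returns True, B raises IndexError
import Mathlib
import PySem

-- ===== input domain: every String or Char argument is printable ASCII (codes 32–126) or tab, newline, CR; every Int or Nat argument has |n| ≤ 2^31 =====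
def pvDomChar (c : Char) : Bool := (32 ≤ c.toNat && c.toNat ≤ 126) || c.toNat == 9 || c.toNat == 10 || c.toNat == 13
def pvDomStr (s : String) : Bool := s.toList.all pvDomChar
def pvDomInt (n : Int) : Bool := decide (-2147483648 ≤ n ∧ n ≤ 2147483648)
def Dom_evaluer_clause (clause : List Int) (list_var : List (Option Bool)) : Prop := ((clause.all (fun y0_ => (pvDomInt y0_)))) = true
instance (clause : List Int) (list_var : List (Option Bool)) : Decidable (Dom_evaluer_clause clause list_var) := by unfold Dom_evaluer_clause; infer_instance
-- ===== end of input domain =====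

-- B replaces A's stateful short-circuiting loop by a resolve-all phase followed by two
-- membership tests (objective: simpler).

-- ===== PORT A =====
-- Python `get(v, l)`: assert v>0; return l[v-1].  Raising (assert failure or IndexError)
-- is excluded by Pre_, so outside Pre_ the joined lookup's default is irrelevant.
def pyGetHelper (v : Int) (l : List (Option Bool)) : Option Bool :=
  if v > 0 then (PySem.List.pyGet? l (v - 1)).getD none else none

-- A's for-loop over the clause, carrying the `result` and `unknown` flags.
def evaluerLoopA (list_var : List (Option Bool)) :
    List Int → Bool → Bool → Option Bool
  | [], result, unknown =>
      if result = false ∧ unknown then none else some result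
  | i :: rest, result, unknown =>
      match pyGetHelper |i| list_var with
      | none =>
          if result then some result else evaluerLoopA list_var rest result true
      | some v =>
          let v' := if i < 0 then !v else v
          let result' := result || v'
          if result' then some result' else evaluerLoopA list_var rest result' unknown

def evaluer_clause (clause : List Int) (list_var : List (Option Bool)) : Option Bool :=
  if clause.length < 1 then some false
  else evaluerLoopA list_var clause false false

-- ===== PORT B =====
def evaluer_clause_alt (clause : List Int) (list_var : List (Option Bool)) : Option Bool :=
  let vals := clause.map (fun i =>
    match pyGetHelper |i| list_var with
    | none => (none : Option Bool)
    | some v => some (if i < 0 then !v else v))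
  if vals.contains (some true) then some true
  else if vals.contains none then none
  else some false

-- ===== PRECONDITION & SPEC =====
-- Pre_ excludes clauses containing 0 or a literal whose variable index exceeds len(list_var):
-- on those A raises (AssertionError / IndexError) unless an earlier literal already made the
-- clause true (an artefact of A's short-circuit return), and B's resolve-all phase raises.
def Pre_evaluer_clause (clause : List Int) (list_var : List (Option Bool)) : Prop :=
  ∀ i ∈ clause, i ≠ 0 ∧ i.natAbs ≤ list_var.length

instance (clause : List Int) (list_var : List (Option Bool)) : Decidable (Pre_evaluer_clause clause list_var) := by unfold Pre_evaluer_clause; infer_instance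

def pvWitness_evaluer_clause : List Int × List (Option Bool) := ([1, -2], [some false, none])

def Spec_evaluer_clause (clause : List Int) (list_var : List (Option Bool)) (out : Option Bool) : Prop := out = evaluer_clause_alt clause list_var
instance (clause : List Int) (list_var : List (Option Bool)) (out : Option Bool) : Decidable (Spec_evaluer_clause clause list_var out) := by unfold Spec_evaluer_clause; infer_instance

-- ===== CLAIM (what is proved, stated in full; the proofs are below) =====
def Claim_equal_evaluer_clause : Prop := ∀ (clause : List Int) (list_var : List (Option Bool)), Dom_evaluer_clause clause list_var → Pre_evaluer_clause clause list_var → Spec_evaluer_clause clause list_var (evaluer_clause clause list_var)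

-- ===== LEMMAS AND PROOFS =====

-- the value B records for a single literal
def litVal (list_var : List (Option Bool)) (i : Int) : Option Bool :=
  match pyGetHelper |i| list_var with
  | none => (none : Option Bool)
  | some v => some (if i < 0 then !v else v)

-- A's loop started with result = false computes B's membership answer, with the
-- incoming `unknown` flag acting like an extra `none` already seen.
theorem loopA_eq_membership (list_var : List (Option Bool)) (clause : List Int)
    (unknown : Bool) :
    evaluerLoopA list_var clause false unknown =
      (if (clause.map (litVal list_var)).contains (some true) then some true
       else if (clause.map (litVal list_var)).contains none || unknown then none
       else some false) := by
  induction clause generalizing unknown with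
  | nil => cases unknown <;> simp [evaluerLoopA]
  | cons i rest ih =>
    simp only [List.map_cons, List.contains_cons]
    cases hg : pyGetHelper |i| list_var with
    | none =>
      simp only [evaluerLoopA, hg, litVal, ih true]
      split_ifs <;> simp_all <;> tauto
    | some v =>
      by_cases hv : (if i < 0 then !v else v) = true
      · simp [evaluerLoopA, hg, litVal, hv]
      · simp only [Bool.not_eq_true] at hv
        simp [evaluerLoopA, hg, litVal, hv, ih unknown]

theorem evaluer_clause_spec : Claim_equal_evaluer_clause := by
  intro clause list_var _ _
  unfold Spec_evaluer_clause evaluer_clause evaluer_clause_alt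
  cases clause with
  | nil => simp
  | cons i rest =>
    simp only [List.length_cons]
    rw [if_neg (by omega)]
    rw [loopA_eq_membership list_var (i :: rest) false]
    simp [litVal]
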